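-- pv_equiv track=rewrite | github.com/pps-lab/MP-SPDZ | Compiler/oram.py | demux_list
-- ===== SOURCE A (Python) =====
-- import operator
-- from functools import reduce
--
-- def demux_list(x):
--     n = len(x)
--     if n == 0:
--         return [1]
--     elif n == 1:
--         return [1 - x[0], x[0]]
--     a = demux_list(x[:n//2])
--     b = demux_list(x[n//2:])
--     n_a = len(a)
--     a *= len(b)
--     b = reduce(operator.add, ([i] * n_a for i in b))
--     res = list(map(operator.mul, a, b))
--     return res
-- ===== SOURCE B (Python) =====
-- def demux_list(x):
--     if not x:
--         return [1]
--     res = [1 - x[0], x[0]]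
--     for xi in x[1:]:
--         res = [r * (1 - xi) for r in res] + [r * xi for r in res]
--     return res
-- ===== Notes on version B (the rewrite author's own statement) =====
-- stated objective: simpler
-- what changed: Replaces the divide-and-conquer recursion with explicit outer-product expansion by a single iterative doubling pass: start from [1-x0, x0] and for each further bit append the (1-xi)- and xi-scaled copies.
import Mathlib
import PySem

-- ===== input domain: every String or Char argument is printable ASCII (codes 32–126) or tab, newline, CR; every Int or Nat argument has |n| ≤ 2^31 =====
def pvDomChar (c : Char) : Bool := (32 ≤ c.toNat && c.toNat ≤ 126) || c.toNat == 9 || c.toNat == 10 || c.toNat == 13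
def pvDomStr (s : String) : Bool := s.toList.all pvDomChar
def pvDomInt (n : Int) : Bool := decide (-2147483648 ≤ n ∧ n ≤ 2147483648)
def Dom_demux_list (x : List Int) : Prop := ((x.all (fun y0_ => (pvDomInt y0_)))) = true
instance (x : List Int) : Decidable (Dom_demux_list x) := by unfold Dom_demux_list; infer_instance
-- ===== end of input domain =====

-- B builds the 2^n indicator vector iteratively (one doubling pass per bit) instead of
-- A's divide-and-conquer recursion with an explicit outer product; objective: simpler.

-- ===== PORT A =====
-- x[:k] and x[k:] with 0 ≤ k ≤ len(x) are exactly List.take/List.drop (PySem.List.slice_to/slice_from).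
-- `a *= len(b)` (list repetition) is (List.replicate b.length a).flatten;
-- reduce(operator.add, …) over the nonempty generator is a foldl of (· ++ ·) from the first block.
def demux_list (x : List Int) : List Int :=
  match x with
  | [] => [1]
  | [x0] => [1 - x0, x0]
  | x0 :: x1 :: rest =>
    let n := (x0 :: x1 :: rest).length
    let a := demux_list ((x0 :: x1 :: rest).take (n / 2))
    let b := demux_list ((x0 :: x1 :: rest).drop (n / 2))
    let n_a := a.length
    let a2 := (List.replicate b.length a).flatten
    -- reduce over a nonempty list = foldl from its first element; headD's default is unreachable
    let mapped := b.map (fun i => List.replicate n_a i)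
    let b2 := mapped.tail.foldl (· ++ ·) (mapped.headD [])
    List.zipWith (· * ·) a2 b2
termination_by x.length
decreasing_by
  all_goals simp [List.length_take, List.length_drop]
  all_goals omega

-- ===== PORT B =====
def demux_list_alt (x : List Int) : List Int :=
  match x with
  | [] => [1]
  | x0 :: rest =>
    rest.foldl (fun res xi => res.map (fun r => r * (1 - xi)) ++ res.map (fun r => r * xi))
      [1 - x0, x0]

-- ===== PRECONDITION & SPEC =====
def Spec_demux_list (x : List Int) (out : List Int) : Prop := out = demux_list_alt x
instance (x : List Int) (out : List Int) : Decidable (Spec_demux_list x out) := by unfold Spec_demux_list; infer_instance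

-- ===== CLAIM (what is proved, stated in full; the proofs are below) =====
def Claim_equal_demux_list : Prop := ∀ (x : List Int), Dom_demux_list x → Spec_demux_list x (demux_list x)

-- ===== LEMMAS AND PROOFS =====

-- product of the bit factors of index k: factor i is x_i if bit i of k is set, else 1 - x_i
def pvProdBits : List Int → Nat → Int
  | [], _ => 1
  | a :: t, k => (if k % 2 = 1 then a else 1 - a) * pvProdBits t (k / 2)

-- the common specification value: entry k of the demux vector
def pvF (x : List Int) : List Int := (List.range (2 ^ x.length)).map (pvProdBits x)

lemma pvProdBits_append (lo hi : List Int) (j i : Nat) (h : i < 2 ^ lo.length) :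
    pvProdBits (lo ++ hi) (j * 2 ^ lo.length + i) = pvProdBits lo i * pvProdBits hi j := by
  induction lo generalizing i j with
  | nil =>
    have hi0 : i = 0 := by simpa using h
    subst hi0
    simp [pvProdBits]
  | cons a t ih =>
    rw [List.length_cons, pow_succ] at h ⊢
    have e1 : j * (2 ^ t.length * 2) + i = j * 2 ^ t.length * 2 + i := by ring
    have h2 : (j * 2 ^ t.length * 2 + i) % 2 = i % 2 := by omega
    have h3 : (j * 2 ^ t.length * 2 + i) / 2 = j * 2 ^ t.length + i / 2 := by omega
    have hlt : i / 2 < 2 ^ t.length := by omega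
    simp only [List.cons_append, pvProdBits, e1, h2, h3]
    rw [ih j (i / 2) hlt, mul_assoc]

lemma pvMapRangeMul {α : Type} (f : Nat → α) (a b : Nat) :
    (List.range (b * a)).map f
      = (List.range b).flatMap (fun j => (List.range a).map (fun i => f (j * a + i))) := by
  induction b with
  | zero => simp
  | succ b ih =>
    rw [Nat.succ_mul, List.range_add, List.range_succ]
    simp [ih, List.map_map, Function.comp_def]

lemma pvF_append (lo hi : List Int) :
    pvF (lo ++ hi) = (pvF hi).flatMap (fun bj => (pvF lo).map (fun r => r * bj)) := by
  unfold pvF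
  have hp : (2 : Nat) ^ (lo ++ hi).length = 2 ^ hi.length * 2 ^ lo.length := by
    rw [List.length_append, pow_add, mul_comm]
  rw [hp, pvMapRangeMul, List.flatMap_map]
  apply List.flatMap_congr
  intro j hj
  rw [List.map_map]
  apply List.map_congr_left
  intro i hi2
  exact pvProdBits_append lo hi j i (List.mem_range.mp hi2)

lemma pvF_nil : pvF ([] : List Int) = [1] := by decide

lemma pvF_single (x0 : Int) : pvF [x0] = [1 - x0, x0] := by
  simp [pvF, pvProdBits, List.range_succ]

lemma pv_foldl_append {α : Type} (l : List (List α)) (init : List α) :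
    l.foldl (· ++ ·) init = init ++ l.flatten := by
  induction l generalizing init with
  | nil => simp
  | cons h t ih => simp [ih, List.append_assoc]

lemma pvF_ne_nil (l : List Int) : pvF l ≠ [] := by
  simp [pvF, List.range_eq_nil]

lemma pv_head_tail_fold (l : List (List Int)) (h : l ≠ []) :
    l.tail.foldl (· ++ ·) (l.headD []) = l.flatten := by
  cases l with
  | nil => simp at h
  | cons a t => simp [pv_foldl_append]

lemma pv_zip_outer (b a : List Int) :
    List.zipWith (· * ·) ((List.replicate b.length a).flatten)
        ((b.map (fun i => List.replicate a.length i)).flatten)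
      = b.flatMap (fun bj => a.map (fun r => r * bj)) := by
  induction b with
  | nil => simp
  | cons h t ih =>
    have hz : ∀ (l : List Int) (c : Int),
        List.zipWith (· * ·) l (List.replicate l.length c) = l.map (fun r => r * c) := by
      intro l c; induction l with
      | nil => simp
      | cons p q ihq => simp [List.replicate_succ, ihq]
    simp only [List.length_cons, List.replicate_succ, List.map_cons, List.flatten_cons,
      List.flatMap_cons]
    rw [List.zipWith_append (by simp), ih, hz]

lemma demux_eq_pvF (x : List Int) : demux_list x = pvF x := by
  induction x using demux_list.induct with
  | case1 => rw [demux_list]; exact pvF_nil.symm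
  | case2 x0 => rw [demux_list]; exact (pvF_single x0).symm
  | case3 x0 x1 rest n iha ihb =>
    rw [demux_list]
    have hn : (x0 :: x1 :: rest).length = n := rfl
    rw [hn]
    simp only [iha, ihb]
    rw [pv_head_tail_fold _ (by simp [pvF_ne_nil]), pv_zip_outer, ← pvF_append,
      List.take_append_drop]

lemma alt_eq_pvF (x : List Int) : demux_list_alt x = pvF x := by
  cases x with
  | nil => rw [demux_list_alt]; exact pvF_nil.symm
  | cons x0 rest =>
    have key : ∀ (l : List Int) (pre : List Int),
        l.foldl (fun res xi => res.map (fun r => r * (1 - xi)) ++ res.map (fun r => r * xi))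
          (pvF pre) = pvF (pre ++ l) := by
      intro l
      induction l with
      | nil => intro pre; simp
      | cons xi t ih =>
        intro pre
        have hstep : (pvF pre).map (fun r => r * (1 - xi)) ++ (pvF pre).map (fun r => r * xi)
            = pvF (pre ++ [xi]) := by
          rw [pvF_append pre [xi], pvF_single]
          simp [List.flatMap_cons]
        simp only [List.foldl_cons, hstep, ih]
        simp
    rw [demux_list_alt]
    have := key rest [x0]
    rw [pvF_single] at this
    simpa using this

-- ===== VERDICT (by name: the statement is the Claim_ definition above) =====
theorem demux_list_spec : Claim_equal_demux_list := by
  intro x _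
  show demux_list x = demux_list_alt x
  rw [demux_eq_pvF, alt_eq_pvF]
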